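-- pv_equiv track=rewrite | github.com/nxxxtyetdecided/algorithm-study | nxxxtyetdecided/3-12-9_문자열압축.py | solution
-- ===== SOURCE A (Python) =====
-- def solution(s):
--     answer = len(s)
--     for step in range(1, len(s)//2 +1):
--         compressed =""
--         prev = s[:step]
--         cnt = 1
--
--         # 문자열과 비교
--         for i in range(step, len(s), step):
--             if prev == s[i:i+step]:
--                 cnt += 1
--             else:
--                 if cnt >= 2 :
--                     compressed += str(cnt) + prev
--                 else:
--                     compressed += prev
--                 prev = s[i:i+step] # 다음 문자열로 초기화
--                 cnt = 1
--         compressed += str(cnt) + prev if cnt >=2 else prev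
--         answer = min(answer, len(compressed))
--     return answer
-- ===== SOURCE B (Python) =====
-- def solution(s):
--     n = len(s)
--     best = n
--     for step in range(1, n // 2 + 1):
--         total = 0
--         i = 0
--         while i < n:
--             # longest common extension of s[i:] and s[i+step:], character by character
--             m = 0
--             while i + step + m < n and s[i + m] == s[i + step + m]:
--                 m += 1
--             k = 1 + m // step  # run length: k equal blocks of size step starting at i
--             total += min(step, n - i) + (len(str(k)) if k >= 2 else 0)
--             i += k * step
--         best = min(best, total)
--     return best
-- ===== Notes on version B (the rewrite author's own statement) =====
-- stated objective: faster
-- what changed: Replaces A's block-slicing prev/cnt state machine that builds the compressed string by repeated concatenation with character-level longest-common-extension matching: at each run start it counts matching characters one step apart, derives the whole run length at once, jumps to the next run, and accumulates the compressed length arithmetically without ever materialising blocks or the compressed string.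
import Mathlib
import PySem

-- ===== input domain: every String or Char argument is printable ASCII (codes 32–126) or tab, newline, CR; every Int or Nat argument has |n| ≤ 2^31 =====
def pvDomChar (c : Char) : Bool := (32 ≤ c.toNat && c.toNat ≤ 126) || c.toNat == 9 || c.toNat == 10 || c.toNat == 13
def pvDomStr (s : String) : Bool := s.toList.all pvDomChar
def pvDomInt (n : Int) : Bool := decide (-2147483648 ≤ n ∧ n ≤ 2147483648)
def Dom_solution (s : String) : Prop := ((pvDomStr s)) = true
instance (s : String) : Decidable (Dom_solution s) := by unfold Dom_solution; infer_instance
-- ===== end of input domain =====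

-- B replaces A's block-slicing prev/cnt state machine that concatenates the compressed
-- string with character-level longest-common-extension matching that jumps run by run
-- and accumulates the compressed length arithmetically (objective: alternative).

-- ===== PORT A =====
def solution (s : String) : Int :=
  let cs := s.toList
  let n : Int := PySem.Str.len s
  (PySem.List.pyRange 1 (PySem.Int.floordiv n 2 + 1) 1).foldl
    (fun answer step =>
      -- compressed = ""; prev = s[:step]; cnt = 1
      let st := (PySem.List.pyRange step n step).foldl
        (fun (st : List Char × List Char × Int) i =>
          if st.2.1 = PySem.List.slice cs (some i) (some (i + step)) then
            (st.1, st.2.1, st.2.2 + 1)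
          else
            (st.1 ++ (if st.2.2 ≥ 2 then PySem.Int.toChars st.2.2 ++ st.2.1 else st.2.1),
              PySem.List.slice cs (some i) (some (i + step)), 1))
        ([], PySem.List.slice cs none (some step), 1)
      let compressed := st.1 ++ (if st.2.2 ≥ 2 then PySem.Int.toChars st.2.2 ++ st.2.1 else st.2.1)
      min answer (PySem.List.len compressed))
    n

-- ===== PORT B =====
-- inner while: longest common extension of s[i:] and s[i+step:], character by character
def pvLCE (cs : List Char) (step i m : Nat) : Nat :=
  if _h : i + step + m < cs.length ∧ cs[i + m]? = cs[i + step + m]? then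
    pvLCE cs step i (m + 1)
  else m
termination_by cs.length - (i + step + m)
decreasing_by omega

-- outer while over run starts; 'stp' carries step-1 so the block size stp+1 is positive
def pvRun (cs : List Char) (stp i total : Nat) : Nat :=
  if h : i < cs.length then
    pvRun cs stp (i + (1 + pvLCE cs (stp + 1) i 0 / (stp + 1)) * (stp + 1))
      (total + min (stp + 1) (cs.length - i) +
        (if 2 ≤ 1 + pvLCE cs (stp + 1) i 0 / (stp + 1) then
          (PySem.Int.toChars ((1 + pvLCE cs (stp + 1) i 0 / (stp + 1) : Nat) : Int)).length
        else 0))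
  else total
termination_by cs.length - i
decreasing_by
  exact Nat.sub_lt_sub_left h (Nat.lt_add_of_pos_right (Nat.mul_pos (Nat.add_pos_left Nat.one_pos _) (Nat.add_pos_right _ Nat.one_pos)))

def solution_alt (s : String) : Int :=
  let cs := s.toList
  let n : Int := PySem.Str.len s
  -- for step in range(1, n//2+1): iterated as stp = step-1 over range(n//2)
  (List.range (PySem.Int.floordiv n 2).toNat).foldl
    (fun best stp => min best ((pvRun cs stp 0 0 : Nat) : Int)) n

-- ===== PRECONDITION & SPEC =====
def Spec_solution (s : String) (out : Int) : Prop := out = solution_alt s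
instance (s : String) (out : Int) : Decidable (Spec_solution s out) := by unfold Spec_solution; infer_instance

-- ===== CLAIM (what is proved, stated in full; the proofs are below) =====
def Claim_equal_solution : Prop := ∀ (s : String), Dom_solution s → Spec_solution s (solution s)

-- ===== LEMMAS AND PROOFS =====

-- block of size step starting at i
def pvBlk (cs : List Char) (step i : Nat) : List Char := (cs.drop i).take step

-- positions of block starts from j on (step = stp+1)
def pvPos (cs : List Char) (stp j : Nat) : List Nat :=
  if j < cs.length then j :: pvPos cs stp (j + stp + 1) else []
termination_by cs.length - j
decreasing_by omega

-- A's inner-loop step, over the block itself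
def pvFA (st : List Char × List Char × Int) (b : List Char) : List Char × List Char × Int :=
  if st.2.1 = b then (st.1, st.2.1, st.2.2 + 1)
  else (st.1 ++ (if st.2.2 ≥ 2 then PySem.Int.toChars st.2.2 ++ st.2.1 else st.2.1), b, 1)

def pvEmit (p : List Char) (c : Int) : List Char :=
  if c ≥ 2 then PySem.Int.toChars c ++ p else p

def pvLen (st : List Char × List Char × Int) : Nat :=
  (st.1 ++ pvEmit st.2.1 st.2.2).length

theorem pvLCE_spec (cs : List Char) (step i : Nat) :
    ∀ N m, cs.length - (i + step + m) ≤ N →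
      m ≤ pvLCE cs step i m ∧
      (∀ t, m ≤ t → t < pvLCE cs step i m →
        i + step + t < cs.length ∧ cs[i + t]? = cs[i + step + t]?) ∧
      ¬(i + step + pvLCE cs step i m < cs.length ∧
        cs[i + pvLCE cs step i m]? = cs[i + step + pvLCE cs step i m]?) := by
  intro N
  induction N with
  | zero =>
    intro m hm
    rw [pvLCE]
    rw [dif_neg (by omega)]
    exact ⟨le_refl m, fun t h1 h2 => absurd h2 (by omega), by omega⟩
  | succ N ih =>
    intro m hm
    by_cases h : i + step + m < cs.length ∧ cs[i + m]? = cs[i + step + m]?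
    · rw [pvLCE, dif_pos h]
      obtain ⟨ih1, ih2, ih3⟩ := ih (m + 1) (by omega)
      refine ⟨by omega, ?_, ih3⟩
      intro t ht1 ht2
      rcases Nat.eq_or_lt_of_le ht1 with he | hlt
      · exact he ▸ h
      · exact ih2 t hlt ht2
    · rw [pvLCE, dif_neg h]
      exact ⟨le_refl m, fun t h1 h2 => absurd h2 (by omega), h⟩

-- chained shift: char equality up to m propagates block-to-block
theorem pv_chain (cs : List Char) (step i m : Nat)
    (H : ∀ t, t < m → cs[i + t]? = cs[i + step + t]?) :
    ∀ j t, t < step → j * step ≤ m → cs[i + t]? = cs[i + j * step + t]? := by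
  intro j
  induction j with
  | zero => intro t _ _; norm_num
  | succ j ih =>
    intro t ht hj
    have hle : j * step ≤ m := le_trans (Nat.mul_le_mul_right step (Nat.le_succ j)) hj
    have hlt : j * step + t < m := by
      have : j * step + t < (j + 1) * step := by
        rw [Nat.succ_mul]; omega
      omega
    calc cs[i + t]? = cs[i + j * step + t]? := ih t ht hle
      _ = cs[i + step + (j * step + t)]? := by
            rw [show i + j * step + t = i + (j * step + t) from by ring]
            exact H (j * step + t) hlt
      _ = cs[i + (j + 1) * step + t]? := by
            rw [show i + step + (j * step + t) = i + (j + 1) * step + t from by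
              rw [Nat.succ_mul]; ring]

-- blocks inside the matched region equal the base block
theorem pv_blk_eq (cs : List Char) (step i m j : Nat)
    (H : ∀ t, t < m → cs[i + t]? = cs[i + step + t]?)
    (hj : j * step ≤ m) :
    pvBlk cs step (i + j * step) = pvBlk cs step i := by
  rcases Nat.eq_zero_or_pos j with rfl | hjpos
  · simp [pvBlk]
  · apply List.ext_getElem?
    intro t
    simp only [pvBlk, List.getElem?_take, List.getElem?_drop]
    by_cases ht : t < step
    · rw [if_pos ht, if_pos ht]
      exact (pv_chain cs step i m H j t ht hj).symm
    · rw [if_neg ht, if_neg ht]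

-- the block after the run differs from the base block
theorem pv_blk_ne (cs : List Char) (stp i : Nat) (hi : i < cs.length)
    (hk : i + (1 + pvLCE cs (stp + 1) i 0 / (stp + 1)) * (stp + 1) < cs.length) :
    pvBlk cs (stp + 1) (i + (1 + pvLCE cs (stp + 1) i 0 / (stp + 1)) * (stp + 1)) ≠
      pvBlk cs (stp + 1) i := by
  set step := stp + 1 with hstepdef
  set m := pvLCE cs step i 0 with hmdef
  obtain ⟨-, hprop, hstop⟩ := pvLCE_spec cs step i cs.length 0 (by omega)
  have H : ∀ t, t < m → cs[i + t]? = cs[i + step + t]? :=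
    fun t ht => (hprop t (Nat.zero_le t) ht).2
  have hks : (1 + m / step) * step = step + (m / step) * step := by
    rw [Nat.add_mul, Nat.one_mul]
  have hdm := Nat.div_add_mod m step
  have hcomm := Nat.mul_comm (m / step) step
  by_cases hin : i + step + m < cs.length
  · have hne : cs[i + m]? ≠ cs[i + step + m]? := fun he => hstop ⟨hin, he⟩
    intro heq
    apply hne
    have hbase : pvBlk cs step (i + (m / step) * step) = pvBlk cs step i :=
      pv_blk_eq cs step i m (m / step) H (Nat.div_mul_le_self m step)
    have ht : m % step < step := Nat.mod_lt m (by omega)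
    have e1 : (pvBlk cs step (i + (m / step) * step))[m % step]? = cs[i + m]? := by
      simp only [pvBlk, List.getElem?_take, List.getElem?_drop, if_pos ht]
      congr 1
      omega
    have e2 : (pvBlk cs step (i + (1 + m / step) * step))[m % step]? = cs[i + step + m]? := by
      simp only [pvBlk, List.getElem?_take, List.getElem?_drop, if_pos ht]
      congr 1
      rw [hks]
      omega
    rw [← e1, ← e2, heq, ← hbase]
  · intro heq
    have hlen := congrArg List.length heq
    have l1 : (pvBlk cs step (i + (1 + m / step) * step)).length
        = min step (cs.length - (i + (1 + m / step) * step)) := by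
      simp [pvBlk]
    have l2 : (pvBlk cs step i).length = min step (cs.length - i) := by
      simp [pvBlk]
    rw [l1, l2] at hlen
    rw [hks] at hlen hk
    have key := Nat.div_add_mod' m step
    have hmodlt : m % step < step := Nat.mod_lt m (by omega)
    generalize hgen : m / step * step = p at key hlen hk
    omega

-- peeling a run of r equal blocks off A's fold
theorem pv_peel (cs : List Char) (stp : Nat) (b : List Char) :
    ∀ r i (acc : List Char) (c : Int),
      (∀ j, j < r → pvBlk cs (stp + 1) (i + (j + 1) * (stp + 1)) = b) →
      i + r * (stp + 1) < cs.length →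
      ((pvPos cs stp (i + stp + 1)).map (pvBlk cs (stp + 1))).foldl pvFA (acc, b, c)
        = ((pvPos cs stp (i + r * (stp + 1) + stp + 1)).map (pvBlk cs (stp + 1))).foldl pvFA
            (acc, b, c + r) := by
  intro r
  induction r with
  | zero => intro i acc c _ _; norm_num
  | succ r ih =>
    intro i acc c h hn
    have hstep1 : stp + 1 ≤ (r + 1) * (stp + 1) := Nat.le_mul_of_pos_left _ (Nat.succ_pos r)
    have hlt : i + stp + 1 < cs.length := by omega
    have hb0 : pvBlk cs (stp + 1) (i + stp + 1) = b := by
      have := h 0 (Nat.succ_pos r)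
      rwa [show i + (0 + 1) * (stp + 1) = i + stp + 1 from by ring] at this
    rw [pvPos, if_pos hlt, List.map_cons, List.foldl_cons, hb0]
    have hfa : pvFA (acc, b, c) b = (acc, b, c + 1) := by simp [pvFA]
    rw [hfa]
    have h' : ∀ j, j < r → pvBlk cs (stp + 1) (i + stp + 1 + (j + 1) * (stp + 1)) = b := by
      intro j hj
      have := h (j + 1) (by omega)
      rwa [show i + (j + 1 + 1) * (stp + 1) = i + stp + 1 + (j + 1) * (stp + 1) from by ring]
        at this
    have hn' : i + stp + 1 + r * (stp + 1) < cs.length := by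
      rw [show i + stp + 1 + r * (stp + 1) = i + (r + 1) * (stp + 1) from by ring]
      exact hn
    have := ih (i + stp + 1) acc (c + 1) h' hn'
    rw [this,
      show i + stp + 1 + r * (stp + 1) + stp + 1 = i + (r + 1) * (stp + 1) + stp + 1 from by ring]
    have hc : (acc, b, c + 1 + (r : Int)) = (acc, b, c + ((r + 1 : Nat) : Int)) := by
      push_cast
      ring_nf
    rw [hc]

theorem pvRun_shift (cs : List Char) (stp : Nat) :
    ∀ N i t, cs.length - i ≤ N → pvRun cs stp i t = t + pvRun cs stp i 0 := by
  intro N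
  induction N with
  | zero =>
    intro i t hN
    rw [pvRun, dif_neg (by omega), pvRun, dif_neg (by omega)]
    omega
  | succ N ih =>
    intro i t hN
    by_cases hi : i < cs.length
    · rw [pvRun, dif_pos hi]
      conv_rhs => rw [pvRun, dif_pos hi]
      have hpos : 0 < (1 + pvLCE cs (stp + 1) i 0 / (stp + 1)) * (stp + 1) :=
        Nat.mul_pos (Nat.add_pos_left Nat.one_pos _) (Nat.add_pos_right _ Nat.one_pos)
      have hm : cs.length - (i + (1 + pvLCE cs (stp + 1) i 0 / (stp + 1)) * (stp + 1)) ≤ N := by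
        omega
      have e1 := ih (i + (1 + pvLCE cs (stp + 1) i 0 / (stp + 1)) * (stp + 1))
        (t + min (stp + 1) (cs.length - i) +
          (if 2 ≤ 1 + pvLCE cs (stp + 1) i 0 / (stp + 1) then
            (PySem.Int.toChars ((1 + pvLCE cs (stp + 1) i 0 / (stp + 1) : Nat) : Int)).length
          else 0)) hm
      have e2 := ih (i + (1 + pvLCE cs (stp + 1) i 0 / (stp + 1)) * (stp + 1))
        (0 + min (stp + 1) (cs.length - i) +
          (if 2 ≤ 1 + pvLCE cs (stp + 1) i 0 / (stp + 1) then
            (PySem.Int.toChars ((1 + pvLCE cs (stp + 1) i 0 / (stp + 1) : Nat) : Int)).length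
          else 0)) hm
      rw [e1, e2]
      omega
    · rw [pvRun, dif_neg hi, pvRun, dif_neg hi]
      omega

-- main: A's fold from a run start computes acc plus B's arithmetic total
theorem pv_main (cs : List Char) (stp : Nat) :
    ∀ N i (acc : List Char), cs.length - i ≤ N → i < cs.length →
      pvLen (((pvPos cs stp (i + stp + 1)).map (pvBlk cs (stp + 1))).foldl pvFA
          (acc, pvBlk cs (stp + 1) i, 1))
        = acc.length + pvRun cs stp i 0 := by
  intro N
  induction N with
  | zero => intro i acc hN hi; omega
  | succ N ih =>
    intro i acc hN hi
    rw [pvRun, dif_pos hi]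
    set step := stp + 1 with hstepdef
    set m := pvLCE cs step i 0 with hmdef
    set r := m / step with hrdef
    obtain ⟨-, hprop, hstop⟩ := pvLCE_spec cs step i cs.length 0 (by omega)
    have H : ∀ t, t < m → cs[i + t]? = cs[i + step + t]? :=
      fun t ht => (hprop t (Nat.zero_le t) ht).2
    have hrm : r * step ≤ m := Nat.div_mul_le_self m step
    have hblocks : ∀ j, j < r → pvBlk cs step (i + (j + 1) * step) = pvBlk cs step i := by
      intro j hj
      exact pv_blk_eq cs step i m (j + 1) H
        (le_trans (Nat.mul_le_mul_right step (by omega)) hrm)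
    have hrn : i + r * step < cs.length := by
      rcases Nat.eq_zero_or_pos r with h0 | h1
      · rw [h0]; simpa using hi
      · have hm1 : 1 ≤ m := by
          by_contra hc
          have : m = 0 := by omega
          rw [hrdef, this, Nat.zero_div] at h1
          omega
        have hb := (hprop (m - 1) (Nat.zero_le _) (by omega)).1
        omega
    have hpeel := pv_peel cs stp (pvBlk cs step i) r i acc 1 hblocks hrn
    have hposeq : i + r * step + stp + 1 = i + (1 + r) * step := by
      rw [hstepdef, Nat.add_mul, Nat.one_mul]; ring
    have hkk : (1 + r) * step = step + r * step := by rw [Nat.add_mul, Nat.one_mul]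
    rw [hpeel]
    have hshift := pvRun_shift cs stp (cs.length) (i + (1 + r) * step)
      (0 + min step (cs.length - i) +
        (if 2 ≤ 1 + r then (PySem.Int.toChars ((1 + r : Nat) : Int)).length else 0))
      (by omega)
    rw [hshift]
    have hblen : (pvBlk cs step i).length = min step (cs.length - i) := by
      simp [pvBlk]
    have hemit : (pvEmit (pvBlk cs step i) (1 + (r : Int))).length
        = min step (cs.length - i) +
          (if 2 ≤ 1 + r then (PySem.Int.toChars ((1 + r : Nat) : Int)).length else 0) := by
      unfold pvEmit
      by_cases h2 : 2 ≤ 1 + r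
      · rw [if_pos (by omega), if_pos h2, List.length_append, hblen,
          show ((1 + r : Nat) : Int) = 1 + (r : Int) from by push_cast; ring]
        ring
      · rw [if_neg (by omega), if_neg h2, hblen]
        omega
    by_cases hend : i + (1 + r) * step < cs.length
    · rw [pvPos, hposeq, if_pos hend, List.map_cons, List.foldl_cons]
      have hne : pvBlk cs step (i + (1 + r) * step) ≠ pvBlk cs step i :=
        pv_blk_ne cs stp i hi hend
      have hfa : pvFA (acc, pvBlk cs step i, 1 + (r : Int)) (pvBlk cs step (i + (1 + r) * step))
          = (acc ++ pvEmit (pvBlk cs step i) (1 + (r : Int)),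
             pvBlk cs step (i + (1 + r) * step), 1) := by
        rw [pvFA, if_neg (fun hc => hne hc.symm)]
        rfl
      have hcast : (1 : Int) + (r : Int) = 1 + (r : Int) := rfl
      rw [hfa]
      have hih := ih (i + (1 + r) * step) (acc ++ pvEmit (pvBlk cs step i) (1 + (r : Int)))
        (by have := hkk; omega) hend
      rw [show i + (1 + r) * step + stp + 1 = i + (1 + r) * step + stp + 1 from rfl] at hih
      rw [hih, List.length_append, hemit]
      omega
    · rw [pvPos, hposeq, if_neg hend, List.map_nil, List.foldl_nil]
      have hrun0 : pvRun cs stp (i + (1 + r) * step) 0 = 0 := by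
        rw [pvRun, dif_neg hend]
      rw [hrun0]
      simp only [pvLen, List.length_append]
      rw [hemit]
      omega

theorem pv_pyRange_cons (a b s : Int) (hs : 0 < s) (hab : a < b) :
    PySem.List.pyRange a b s = a :: PySem.List.pyRange (a + s) b s := by
  rw [PySem.List.pyRange_of_pos a b hs, PySem.List.pyRange_of_pos (a + s) b hs]
  have hq : (b - a + s - 1) / s = (b - (a + s) + s - 1) / s + 1 := by
    have he : b - a + s - 1 = (b - (a + s) + s - 1) + 1 * s := by ring
    rw [he, Int.add_mul_ediv_right _ _ (by omega : s ≠ 0)]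
  by_cases h2 : a + s < b
  · rw [if_pos hab, if_pos h2, hq]
    have hnn : 0 ≤ (b - (a + s) + s - 1) / s := Int.ediv_nonneg (by omega) (by omega)
    rw [Int.toNat_add hnn (by omega), Int.toNat_one, List.range_succ_eq_map]
    simp only [List.map_cons, List.map_map]
    congr 1
    · simp
    · apply List.map_congr_left
      intro k _
      simp only [Function.comp_apply]
      push_cast
      ring
  · rw [if_pos hab, if_neg h2, hq]
    have hz : (b - (a + s) + s - 1) / s = 0 :=
      Int.ediv_eq_zero_of_lt (by omega) (by omega)
    rw [hz]
    norm_num [List.range_one]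

-- A's Int-indexed block list is the mapped Nat one
theorem pv_bridge (cs : List Char) (stp : Nat) :
    ∀ N (j : Nat), cs.length - j ≤ N →
      (PySem.List.pyRange (j : Int) (cs.length : Int) ((stp : Int) + 1)).map
          (fun x => PySem.List.slice cs (some x) (some (x + ((stp : Int) + 1))))
        = (pvPos cs stp j).map (pvBlk cs (stp + 1)) := by
  intro N
  induction N with
  | zero =>
    intro j hN
    rw [pvPos, if_neg (by omega),
      PySem.List.pyRange_of_pos _ _ (by omega : (0 : Int) < (stp : Int) + 1),
      if_neg (by omega)]
    simp
  | succ N ih =>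
    intro j hN
    by_cases hj : j < cs.length
    · rw [pv_pyRange_cons _ _ _ (by omega) (by exact_mod_cast hj), pvPos, if_pos hj,
        List.map_cons, List.map_cons]
      congr 1
      · rw [show (stp : Int) + 1 = ((stp + 1 : Nat) : Int) from by push_cast; ring,
          PySem.List.slice_natCast_add]
        rfl
      · rw [show (j : Int) + ((stp : Int) + 1) = (((j + stp + 1) : Nat) : Int) from by
          push_cast; ring]
        exact ih (j + stp + 1) (by omega)
    · rw [pvPos, if_neg hj,
        PySem.List.pyRange_of_pos _ _ (by omega : (0 : Int) < (stp : Int) + 1),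
        if_neg (by omega)]
      simp

-- per-step equality of the two loop bodies
theorem pv_step (cs : List Char) (stp : Nat) (h0 : 0 < cs.length) (answer : Int) :
    (let st := (PySem.List.pyRange ((stp : Int) + 1) (cs.length : Int) ((stp : Int) + 1)).foldl
        (fun (st : List Char × List Char × Int) i =>
          if st.2.1 = PySem.List.slice cs (some i) (some (i + ((stp : Int) + 1))) then
            (st.1, st.2.1, st.2.2 + 1)
          else
            (st.1 ++ (if st.2.2 ≥ 2 then PySem.Int.toChars st.2.2 ++ st.2.1 else st.2.1),
              PySem.List.slice cs (some i) (some (i + ((stp : Int) + 1))), 1))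
        ([], PySem.List.slice cs none (some ((stp : Int) + 1)), 1)
     let compressed := st.1 ++ (if st.2.2 ≥ 2 then PySem.Int.toChars st.2.2 ++ st.2.1 else st.2.1)
     min answer (PySem.List.len compressed))
    = min answer ((pvRun cs stp 0 0 : Nat) : Int) := by
  dsimp only
  have hA : (PySem.List.pyRange ((stp : Int) + 1) (cs.length : Int) ((stp : Int) + 1)).foldl
      (fun (st : List Char × List Char × Int) i =>
        if st.2.1 = PySem.List.slice cs (some i) (some (i + ((stp : Int) + 1))) then
          (st.1, st.2.1, st.2.2 + 1)
        else
          (st.1 ++ (if st.2.2 ≥ 2 then PySem.Int.toChars st.2.2 ++ st.2.1 else st.2.1),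
            PySem.List.slice cs (some i) (some (i + ((stp : Int) + 1))), 1))
      ([], PySem.List.slice cs none (some ((stp : Int) + 1)), 1)
    = ((PySem.List.pyRange ((stp : Int) + 1) (cs.length : Int) ((stp : Int) + 1)).map
        (fun x => PySem.List.slice cs (some x) (some (x + ((stp : Int) + 1))))).foldl pvFA
        ([], PySem.List.slice cs none (some ((stp : Int) + 1)), 1) := by
    rw [List.foldl_map]
    rfl
  have hprev : PySem.List.slice cs none (some ((stp : Int) + 1)) = pvBlk cs (stp + 1) 0 := by
    rw [show (stp : Int) + 1 = ((stp + 1 : Nat) : Int) from by push_cast; ring,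
      PySem.List.slice_to_natCast]
    simp [pvBlk]
  have hbr := pv_bridge cs stp cs.length (stp + 1) (by omega)
  rw [show ((stp + 1 : Nat) : Int) = (stp : Int) + 1 from by push_cast; ring] at hbr
  have hmain := pv_main cs stp cs.length 0 [] (by omega) h0
  rw [show (0 : Nat) + stp + 1 = stp + 1 from by omega] at hmain
  rw [hA, hprev, hbr]
  have hlen : PySem.List.len
      ((((pvPos cs stp (stp + 1)).map (pvBlk cs (stp + 1))).foldl pvFA
          ([], pvBlk cs (stp + 1) 0, 1)).1 ++
        (if (((pvPos cs stp (stp + 1)).map (pvBlk cs (stp + 1))).foldl pvFA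
            ([], pvBlk cs (stp + 1) 0, 1)).2.2 ≥ 2 then
          PySem.Int.toChars
            ((((pvPos cs stp (stp + 1)).map (pvBlk cs (stp + 1))).foldl pvFA
                ([], pvBlk cs (stp + 1) 0, 1)).2.2) ++
            (((pvPos cs stp (stp + 1)).map (pvBlk cs (stp + 1))).foldl pvFA
              ([], pvBlk cs (stp + 1) 0, 1)).2.1
        else
          (((pvPos cs stp (stp + 1)).map (pvBlk cs (stp + 1))).foldl pvFA
            ([], pvBlk cs (stp + 1) 0, 1)).2.1))
      = ((pvRun cs stp 0 0 : Nat) : Int) := by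
    rw [PySem.List.len_eq]
    norm_cast
    calc (((((pvPos cs stp (stp + 1)).map (pvBlk cs (stp + 1))).foldl pvFA
          ([], pvBlk cs (stp + 1) 0, 1)).1 ++ _).length)
        = pvLen (((pvPos cs stp (stp + 1)).map (pvBlk cs (stp + 1))).foldl pvFA
            ([], pvBlk cs (stp + 1) 0, 1)) := rfl
      _ = ([] : List Char).length + pvRun cs stp 0 0 := hmain
      _ = pvRun cs stp 0 0 := by simp
  rw [hlen]

-- ===== VERDICT (by name: the statement is the Claim_ definition above) =====
theorem solution_spec : Claim_equal_solution := by
  intro s _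
  unfold Spec_solution solution solution_alt
  dsimp only
  simp only [PySem.Str.len_eq]
  rw [PySem.List.pyRange_one,
    show PySem.Int.floordiv ((s.toList.length : Int)) 2 + 1 - 1
      = PySem.Int.floordiv ((s.toList.length : Int)) 2 from by ring,
    List.foldl_map]
  apply PySem.List.foldl_congr_mem
  intro acc x hx
  have hxlt := List.mem_range.mp hx
  have h0 : 0 < s.toList.length := by
    have e : PySem.Int.floordiv ((s.toList.length : Int)) 2 = (s.toList.length : Int) / 2 := by
      show Int.fdiv _ 2 = _
      rw [Int.fdiv_eq_ediv]
      norm_num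
    rw [e] at hxlt
    omega
  have hstep := pv_step s.toList x h0 acc
  rw [show (1 : Int) + (x : Int) = (x : Int) + 1 from by ring]
  exact hstep
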